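-- pv_equiv track=rewrite | github.com/sanchit52/blogsearch | blogsearch/scraping/scraper.py | is_blog_post
-- ===== SOURCE A (Python) =====
-- def is_blog_post(url):
--     """Heuristic: looks for likely blog‐style URLs."""
--     checks = [
--         "202", "blog", "post", "article",
--         "journey", "career", "story", "experience",
--         "tech", "dev", "manager", "project"
--     ]
--     u = url.lower()
--     return any(c in u for c in checks) and not u.endswith(".xml")
-- ===== SOURCE B (Python) =====
-- _BY_FIRST = {
--     '2': ("02",),
--     'b': ("log",),
--     'p': ("ost", "roject"),
--     'a': ("rticle",),
--     'j': ("ourney",),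
--     'c': ("areer",),
--     's': ("tory",),
--     'e': ("xperience",),
--     't': ("ech",),
--     'd': ("ev",),
--     'm': ("anager",),
-- }
--
-- def is_blog_post(url):
--     """Heuristic: looks for likely blog-style URLs.
--     One scan over the lowercased URL, dispatching on the current character
--     through a first-letter index of the keywords."""
--     u = url.lower()
--     if u.endswith(".xml"):
--         return False
--     for i, ch in enumerate(u):
--         for rest in _BY_FIRST.get(ch, ()):
--             if u.startswith(rest, i + 1):
--                 return True
--     return False
-- ===== Notes on version B (the rewrite author's own statement) =====
-- stated objective: alternative
-- what changed: Replaces the twelve independent whole-string substring searches ('c in u' per keyword) by one scan of the lowercased URL that dispatches each position through a first-letter index (a dict mapping first letter to keyword remainders), with the .xml guard as an early return.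
import Mathlib
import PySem

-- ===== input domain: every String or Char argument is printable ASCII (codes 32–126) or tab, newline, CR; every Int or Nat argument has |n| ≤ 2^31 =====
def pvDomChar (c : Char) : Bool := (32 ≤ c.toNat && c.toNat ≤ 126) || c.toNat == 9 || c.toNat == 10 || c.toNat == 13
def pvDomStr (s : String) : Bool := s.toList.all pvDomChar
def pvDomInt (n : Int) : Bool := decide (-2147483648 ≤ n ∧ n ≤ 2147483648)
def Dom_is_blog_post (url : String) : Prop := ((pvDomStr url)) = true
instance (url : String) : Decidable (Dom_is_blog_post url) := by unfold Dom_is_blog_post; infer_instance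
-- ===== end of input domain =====

-- B replaces the twelve independent whole-string substring searches by a single scan of the
-- lowercased URL that dispatches each position through a first-letter index of the keywords
-- (alternative decomposition, same asymptotic cost).

-- ===== PORT A =====
def is_blog_post (url : String) : Bool :=
  let checks : List String :=
    ["202", "blog", "post", "article",
     "journey", "career", "story", "experience",
     "tech", "dev", "manager", "project"]
  let u := PySem.Str.lower url
  (checks.any (fun c => PySem.Str.isIn c u)) && !(PySem.Str.endswith u ".xml")

-- ===== PORT B =====
-- the module-level dict _BY_FIRST of Source B: keyword remainders indexed by first letter
def byFirst : PySem.Dict Char (List String) :=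
  PySem.Dict.ofList
    [('2', ["02"]), ('b', ["log"]), ('p', ["ost", "roject"]),
     ('a', ["rticle"]), ('j', ["ourney"]), ('c', ["areer"]),
     ('s', ["tory"]), ('e', ["xperience"]), ('t', ["ech"]),
     ('d', ["ev"]), ('m', ["anager"])]

-- Source B's loop 'for i, ch in enumerate(u): for rest in _BY_FIRST.get(ch, ()): if u.startswith(rest, i+1)'
-- as structural recursion over the suffixes of u: the tail at position i IS u[i+1:], so
-- 'u.startswith(rest, i+1)' is exactly 'startswith tail rest' (exact port of positional startswith).
def scanByFirst : List Char → Bool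
  | [] => false
  | ch :: tail =>
      ((byFirst.getD ch []).any fun rest => PySem.Chars.startswith tail rest.toList)
      || scanByFirst tail

def is_blog_post_alt (url : String) : Bool :=
  let u := PySem.Str.lower url
  if PySem.Str.endswith u ".xml" then false
  else scanByFirst u.toList

-- ===== PRECONDITION & SPEC =====
def Spec_is_blog_post (url : String) (out : Bool) : Prop := out = is_blog_post_alt url
instance (url : String) (out : Bool) : Decidable (Spec_is_blog_post url out) := by unfold Spec_is_blog_post; infer_instance

-- ===== CLAIM (what is proved, stated in full; the proofs are below) =====
def Claim_equal_is_blog_post : Prop := ∀ (url : String), Dom_is_blog_post url → Spec_is_blog_post url (is_blog_post url)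

-- ===== LEMMAS AND PROOFS =====

-- 'sub in s' unfolds one position: prefix here, or 'sub in tail'
theorem isIn_cons (k : List Char) (c : Char) (t : List Char) :
    PySem.Chars.isIn k (c :: t)
      = (PySem.Chars.startswith (c :: t) k || PySem.Chars.isIn k t) := by
  apply Bool.eq_iff_iff.mpr
  simp only [Bool.or_eq_true, PySem.Chars.startswith_iff,
    ← PySem.Chars.exists_prefix_drop_iff_isIn]
  constructor
  · rintro ⟨j, hj⟩
    cases j with
    | zero => exact Or.inl (by simpa using hj)
    | succ j => exact Or.inr ⟨j, by simpa using hj⟩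
  · rintro (h | ⟨j, hj⟩)
    · exact ⟨0, by simpa using h⟩
    · exact ⟨j + 1, by simpa using hj⟩

theorem startswith_cons (c : Char) (t : List Char) (a : Char) (r : List Char) :
    PySem.Chars.startswith (c :: t) (a :: r)
      = ((a == c) && PySem.Chars.startswith t r) := by
  by_cases h : a = c
  · subst h
    rw [BEq.rfl, Bool.true_and]
    apply Bool.eq_iff_iff.mpr
    rw [PySem.Chars.startswith_iff, PySem.Chars.startswith_iff, List.cons_prefix_cons]
    simp
  · rw [beq_eq_false_iff_ne.mpr h, Bool.false_and, Bool.eq_false_iff]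
    intro hsw
    exact h (List.cons_prefix_cons.mp ((PySem.Chars.startswith_iff _ _).mp hsw)).1

-- .toList of the keyword literals (String.toList of a literal is opaque to simp)
theorem kwTL0 : ("202":String).toList = ['2','0','2'] := rfl
theorem kwTL1 : ("blog":String).toList = ['b','l','o','g'] := rfl
theorem kwTL2 : ("post":String).toList = ['p','o','s','t'] := rfl
theorem kwTL3 : ("article":String).toList = ['a','r','t','i','c','l','e'] := rfl
theorem kwTL4 : ("journey":String).toList = ['j','o','u','r','n','e','y'] := rfl
theorem kwTL5 : ("career":String).toList = ['c','a','r','e','e','r'] := rfl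
theorem kwTL6 : ("story":String).toList = ['s','t','o','r','y'] := rfl
theorem kwTL7 : ("experience":String).toList = ['e','x','p','e','r','i','e','n','c','e'] := rfl
theorem kwTL8 : ("tech":String).toList = ['t','e','c','h'] := rfl
theorem kwTL9 : ("dev":String).toList = ['d','e','v'] := rfl
theorem kwTL10 : ("manager":String).toList = ['m','a','n','a','g','e','r'] := rfl
theorem kwTL11 : ("project":String).toList = ['p','r','o','j','e','c','t'] := rfl
theorem kwTL12 : ("02":String).toList = ['0','2'] := rfl
theorem kwTL13 : ("log":String).toList = ['l','o','g'] := rfl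
theorem kwTL14 : ("ost":String).toList = ['o','s','t'] := rfl
theorem kwTL15 : ("roject":String).toList = ['r','o','j','e','c','t'] := rfl
theorem kwTL16 : ("rticle":String).toList = ['r','t','i','c','l','e'] := rfl
theorem kwTL17 : ("ourney":String).toList = ['o','u','r','n','e','y'] := rfl
theorem kwTL18 : ("areer":String).toList = ['a','r','e','e','r'] := rfl
theorem kwTL19 : ("tory":String).toList = ['t','o','r','y'] := rfl
theorem kwTL20 : ("xperience":String).toList = ['x','p','e','r','i','e','n','c','e'] := rfl
theorem kwTL21 : ("ech":String).toList = ['e','c','h'] := rfl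
theorem kwTL22 : ("ev":String).toList = ['e','v'] := rfl
theorem kwTL23 : ("anager":String).toList = ['a','n','a','g','e','r'] := rfl

-- any distributes over || pointwise
theorem any_or_distrib (ks : List String) (f g : String → Bool) :
    ks.any (fun k => f k || g k) = (ks.any f || ks.any g) := by
  induction ks with
  | nil => rfl
  | cons k ks ih =>
      simp only [List.any_cons, ih]
      cases f k <;> cases g k <;> simp

-- the first-letter dispatch at one position equals the 12 whole-keyword tests at that position
theorem head_dispatch (c : Char) (t : List Char) :
    ((byFirst.getD c []).any fun rest => PySem.Chars.startswith t rest.toList)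
      = (["202", "blog", "post", "article", "journey", "career", "story", "experience",
          "tech", "dev", "manager", "project"].any fun k =>
            PySem.Chars.startswith (c :: t) k.toList) := by
  by_cases h2 : c = '2'
  · subst h2
    rw [show byFirst.getD '2' [] = ["02"] from rfl]
    simp only [List.any_cons, List.any_nil, kwTL0, kwTL1, kwTL2, kwTL3, kwTL4, kwTL5, kwTL6,
      kwTL7, kwTL8, kwTL9, kwTL10, kwTL11, kwTL12, startswith_cons]
    simp
  by_cases hb : c = 'b'
  · subst hb
    rw [show byFirst.getD 'b' [] = ["log"] from rfl]
    simp only [List.any_cons, List.any_nil, kwTL0, kwTL1, kwTL2, kwTL3, kwTL4, kwTL5, kwTL6,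
      kwTL7, kwTL8, kwTL9, kwTL10, kwTL11, kwTL13, startswith_cons]
    simp
  by_cases hp : c = 'p'
  · subst hp
    rw [show byFirst.getD 'p' [] = ["ost", "roject"] from rfl]
    simp only [List.any_cons, List.any_nil, kwTL0, kwTL1, kwTL2, kwTL3, kwTL4, kwTL5, kwTL6,
      kwTL7, kwTL8, kwTL9, kwTL10, kwTL11, kwTL14, kwTL15, startswith_cons]
    simp
  by_cases ha : c = 'a'
  · subst ha
    rw [show byFirst.getD 'a' [] = ["rticle"] from rfl]
    simp only [List.any_cons, List.any_nil, kwTL0, kwTL1, kwTL2, kwTL3, kwTL4, kwTL5, kwTL6,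
      kwTL7, kwTL8, kwTL9, kwTL10, kwTL11, kwTL16, startswith_cons]
    simp
  by_cases hj : c = 'j'
  · subst hj
    rw [show byFirst.getD 'j' [] = ["ourney"] from rfl]
    simp only [List.any_cons, List.any_nil, kwTL0, kwTL1, kwTL2, kwTL3, kwTL4, kwTL5, kwTL6,
      kwTL7, kwTL8, kwTL9, kwTL10, kwTL11, kwTL17, startswith_cons]
    simp
  by_cases hc : c = 'c'
  · subst hc
    rw [show byFirst.getD 'c' [] = ["areer"] from rfl]
    simp only [List.any_cons, List.any_nil, kwTL0, kwTL1, kwTL2, kwTL3, kwTL4, kwTL5, kwTL6,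
      kwTL7, kwTL8, kwTL9, kwTL10, kwTL11, kwTL18, startswith_cons]
    simp
  by_cases hs : c = 's'
  · subst hs
    rw [show byFirst.getD 's' [] = ["tory"] from rfl]
    simp only [List.any_cons, List.any_nil, kwTL0, kwTL1, kwTL2, kwTL3, kwTL4, kwTL5, kwTL6,
      kwTL7, kwTL8, kwTL9, kwTL10, kwTL11, kwTL19, startswith_cons]
    simp
  by_cases he : c = 'e'
  · subst he
    rw [show byFirst.getD 'e' [] = ["xperience"] from rfl]
    simp only [List.any_cons, List.any_nil, kwTL0, kwTL1, kwTL2, kwTL3, kwTL4, kwTL5, kwTL6,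
      kwTL7, kwTL8, kwTL9, kwTL10, kwTL11, kwTL20, startswith_cons]
    simp
  by_cases ht : c = 't'
  · subst ht
    rw [show byFirst.getD 't' [] = ["ech"] from rfl]
    simp only [List.any_cons, List.any_nil, kwTL0, kwTL1, kwTL2, kwTL3, kwTL4, kwTL5, kwTL6,
      kwTL7, kwTL8, kwTL9, kwTL10, kwTL11, kwTL21, startswith_cons]
    simp
  by_cases hd : c = 'd'
  · subst hd
    rw [show byFirst.getD 'd' [] = ["ev"] from rfl]
    simp only [List.any_cons, List.any_nil, kwTL0, kwTL1, kwTL2, kwTL3, kwTL4, kwTL5, kwTL6,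
      kwTL7, kwTL8, kwTL9, kwTL10, kwTL11, kwTL22, startswith_cons]
    simp
  by_cases hm : c = 'm'
  · subst hm
    rw [show byFirst.getD 'm' [] = ["anager"] from rfl]
    simp only [List.any_cons, List.any_nil, kwTL0, kwTL1, kwTL2, kwTL3, kwTL4, kwTL5, kwTL6,
      kwTL7, kwTL8, kwTL9, kwTL10, kwTL11, kwTL23, startswith_cons]
    simp
  -- c matches no key: the dict lookup misses and every keyword test fails on its first letter
  rw [show byFirst = PySem.Dict.mk
    [('2', ["02"]), ('b', ["log"]), ('p', ["ost", "roject"]),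
     ('a', ["rticle"]), ('j', ["ourney"]), ('c', ["areer"]),
     ('s', ["tory"]), ('e', ["xperience"]), ('t', ["ech"]),
     ('d', ["ev"]), ('m', ["anager"])] from rfl]
  simp only [PySem.Dict.getD, PySem.Dict.get?_mk_cons,
    beq_eq_false_iff_ne.mpr (Ne.symm h2), beq_eq_false_iff_ne.mpr (Ne.symm hb),
    beq_eq_false_iff_ne.mpr (Ne.symm hp), beq_eq_false_iff_ne.mpr (Ne.symm ha),
    beq_eq_false_iff_ne.mpr (Ne.symm hj), beq_eq_false_iff_ne.mpr (Ne.symm hc),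
    beq_eq_false_iff_ne.mpr (Ne.symm hs), beq_eq_false_iff_ne.mpr (Ne.symm he),
    beq_eq_false_iff_ne.mpr (Ne.symm ht), beq_eq_false_iff_ne.mpr (Ne.symm hd),
    beq_eq_false_iff_ne.mpr (Ne.symm hm)]
  simp only [List.any_cons, List.any_nil, kwTL0, kwTL1, kwTL2, kwTL3, kwTL4, kwTL5, kwTL6,
    kwTL7, kwTL8, kwTL9, kwTL10, kwTL11, startswith_cons,
    beq_eq_false_iff_ne.mpr (Ne.symm h2), beq_eq_false_iff_ne.mpr (Ne.symm hb),
    beq_eq_false_iff_ne.mpr (Ne.symm hp), beq_eq_false_iff_ne.mpr (Ne.symm ha),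
    beq_eq_false_iff_ne.mpr (Ne.symm hj), beq_eq_false_iff_ne.mpr (Ne.symm hc),
    beq_eq_false_iff_ne.mpr (Ne.symm hs), beq_eq_false_iff_ne.mpr (Ne.symm he),
    beq_eq_false_iff_ne.mpr (Ne.symm ht), beq_eq_false_iff_ne.mpr (Ne.symm hd),
    beq_eq_false_iff_ne.mpr (Ne.symm hm)]
  simp
  intro x hx
  rw [show (PySem.Dict.mk ([] : List (Char × List String))).get? c = none from rfl] at hx
  simp at hx

-- the single dispatching scan equals the 12 substring searches
theorem scan_eq_any_isIn (L : List Char) :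
    scanByFirst L
      = (["202", "blog", "post", "article", "journey", "career", "story", "experience",
          "tech", "dev", "manager", "project"].any fun k => PySem.Chars.isIn k.toList L) := by
  induction L with
  | nil => decide
  | cons c t ih =>
      simp only [scanByFirst, head_dispatch, ih, isIn_cons]
      rw [any_or_distrib]

-- ===== VERDICT (by name: the statement is the Claim_ definition above) =====
theorem is_blog_post_spec : Claim_equal_is_blog_post := by
  intro url _
  unfold Spec_is_blog_post
  dsimp only [is_blog_post, is_blog_post_alt]
  by_cases he : PySem.Str.endswith (PySem.Str.lower url) ".xml" = true
  · rw [he, Bool.not_true, Bool.and_false, if_pos rfl]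
  · rw [Bool.eq_false_iff.mpr he, Bool.not_false, Bool.and_true,
      if_neg (by simp : ¬ false = true), scan_eq_any_isIn]
    simp [PySem.Str.isIn]
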